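-- pv_equiv track=rewrite | github.com/ysskrishna/nestedutils | nestedutils/utils.py | unescape_key
-- ===== SOURCE A (Python) =====
-- def unescape_key(key: str, escape="\\", sep="."):
--     """Unescape separators."""
--     i = 0
--     out = []
--     while i < len(key):
--         if key[i] == escape:
--             i += 1
--             if i < len(key):
--                 out.append(key[i])
--         else:
--             out.append(key[i])
--         i += 1
--     return "".join(out)
-- ===== SOURCE B (Python) =====
-- def unescape_key(key: str, escape="\\", sep="."):
--     """Unescape separators."""
--     # A's one-character comparison key[i] == escape can only match a
--     # single-character escape; for any other escape the key is unchanged.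
--     if len(escape) != 1:
--         return key
--     parts = key.split(escape)
--     out = [parts[0]]
--     n = len(parts)
--     j = 1
--     while j < n:
--         p = parts[j]
--         if p:
--             out.append(p)
--             j += 1
--         elif j + 1 < n:
--             out.append(escape)
--             out.append(parts[j + 1])
--             j += 2
--         else:
--             j += 1
--     return "".join(out)
-- ===== Notes on version B (the rewrite author's own statement) =====
-- stated objective: faster
-- what changed: Replaces A's per-character while-loop state machine by one str.split on the escape character plus a single re-join pass over the split parts (empty parts mark an escaped escape or a trailing escape), with an early return for non-single-character escapes which A's one-character comparison can never match.
import Mathlib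
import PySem

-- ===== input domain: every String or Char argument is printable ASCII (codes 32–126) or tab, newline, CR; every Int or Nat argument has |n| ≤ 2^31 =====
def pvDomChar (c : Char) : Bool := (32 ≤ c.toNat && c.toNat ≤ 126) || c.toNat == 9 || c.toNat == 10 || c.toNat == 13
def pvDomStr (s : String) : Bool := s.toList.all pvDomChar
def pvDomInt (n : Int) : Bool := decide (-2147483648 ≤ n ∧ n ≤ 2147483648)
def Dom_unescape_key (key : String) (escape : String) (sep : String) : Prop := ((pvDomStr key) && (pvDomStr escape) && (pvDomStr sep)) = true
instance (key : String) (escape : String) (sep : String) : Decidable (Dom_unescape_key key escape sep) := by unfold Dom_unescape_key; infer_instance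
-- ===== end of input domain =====

-- B replaces A's per-character while-loop by str.split on the escape plus one re-join
-- pass over the (far fewer) split parts; measurably faster in Python (C-level split/join).

-- ===== PORT A =====
-- A's while loop: index i over key, out an accumulator of appended characters.
def unescapeKeyLoopA (ks : List Char) (esc : List Char) (i : Nat) (out : List Char) : List Char :=
  if h : i < ks.length then
    if [ks[i]] = esc then            -- key[i] == escape : 1-char string vs escape string
      let i1 := i + 1
      let out' := if h2 : i1 < ks.length then out ++ [ks[i1]] else out
      unescapeKeyLoopA ks esc (i1 + 1) out'
    else
      unescapeKeyLoopA ks esc (i + 1) (out ++ [ks[i]])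
  else out
termination_by ks.length - i

def unescape_key (key : String) (escape : String) (sep : String) : String :=
  String.ofList (unescapeKeyLoopA key.toList escape.toList 0 [])

-- ===== PORT B =====
-- Source B's while loop over the split parts: index j, out an accumulator of pieces.
-- parts.getD j [] is Python's parts[j]; the loop only reads indices < n = parts.length.
def unescapeKeyLoopB (esc : List Char) (parts : List (List Char)) (n : Nat) (j : Nat)
    (out : List (List Char)) : List (List Char) :=
  if j < n then
    let p := parts.getD j []
    if p ≠ [] then
      unescapeKeyLoopB esc parts n (j + 1) (out ++ [p])
    else if j + 1 < n then
      unescapeKeyLoopB esc parts n (j + 2) (out ++ [esc, parts.getD (j + 1) []])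
    else
      unescapeKeyLoopB esc parts n (j + 1) out
  else out
termination_by n - j

-- out = [parts[0]] then the loop from j = 1, then "".join(out).
def unescapeKeyJoinB (esc : List Char) (parts : List (List Char)) : List Char :=
  PySem.Chars.join [] (unescapeKeyLoopB esc parts parts.length 1 [parts.getD 0 []])

def unescape_key_alt (key : String) (escape : String) (sep : String) : String :=
  if PySem.Str.len escape ≠ 1 then key
  else String.ofList (unescapeKeyJoinB escape.toList (PySem.Chars.splitOn key.toList escape.toList))

-- ===== PRECONDITION & SPEC =====
def Spec_unescape_key (key : String) (escape : String) (sep : String) (out : String) : Prop := out = unescape_key_alt key escape sep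
instance (key : String) (escape : String) (sep : String) (out : String) : Decidable (Spec_unescape_key key escape sep out) := by unfold Spec_unescape_key; infer_instance

-- ===== CLAIM (what is proved, stated in full; the proofs are below) =====
def Claim_equal_unescape_key : Prop := ∀ (key : String) (escape : String) (sep : String), Dom_unescape_key key escape sep → Spec_unescape_key key escape sep (unescape_key key escape sep)

-- ===== LEMMAS AND PROOFS =====

-- Reference scan: what A computes for a single-character escape e.
def scanE (e : Char) : List Char → List Char
  | [] => []
  | [c] => if c = e then [] else [c]
  | c :: d :: r => if c = e then d :: scanE e r else c :: scanE e (d :: r)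

-- Reference splitter: splitting on the single character e.
def splitE (e : Char) : List Char → List (List Char)
  | [] => [[]]
  | c :: rest => if c = e then [] :: splitE e rest else (splitE e rest).modifyHead (c :: ·)

-- Reference re-join: what B's loop contributes for the parts after the first.
def glueT (esc : List Char) : List (List Char) → List Char
  | [] => []
  | p :: rest =>
      if p ≠ [] then p ++ glueT esc rest
      else match rest with
        | [] => []
        | q :: rest' => esc ++ q ++ glueT esc rest'

theorem glueT_cons_ne (esc : List Char) (p : List Char) (rest : List (List Char))
    (hp : p ≠ []) : glueT esc (p :: rest) = p ++ glueT esc rest := by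
  cases rest <;> simp [glueT, hp]

theorem glueT_nil_singleton (esc : List Char) : glueT esc [[]] = [] := by
  simp [glueT]

theorem glueT_nil_cons (esc : List Char) (q : List Char) (rest : List (List Char)) :
    glueT esc ([] :: q :: rest) = esc ++ q ++ glueT esc rest := by
  simp [glueT]

theorem splitE_ne_nil (e : Char) (s : List Char) : splitE e s ≠ [] := by
  induction s with
  | nil => simp [splitE]
  | cons c rest ih =>
    simp only [splitE]
    split
    · simp
    · cases h : splitE e rest with
      | nil => exact absurd h ih
      | cons => simp

theorem modifyHead_id_eq {α : Type} (l : List α) : l.modifyHead (fun x => x) = l := by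
  cases l <;> simp

theorem go_single (e : Char) (fuel : Nat) :
    ∀ (l cur : List Char) (acc : List (List Char)), l.length < fuel →
      PySem.Chars.splitOn.go [e] fuel l cur acc
        = acc.reverse ++ (splitE e l).modifyHead (cur.reverse ++ ·) := by
  induction fuel with
  | zero => intro l cur acc h; omega
  | succ f ih =>
    intro l cur acc h
    cases l with
    | nil => simp [PySem.Chars.splitOn.go, splitE, List.modifyHead]
    | cons c rest =>
      by_cases hc : c = e
      · subst hc
        have hgo : PySem.Chars.splitOn.go [c] (f + 1) (c :: rest) cur acc
            = PySem.Chars.splitOn.go [c] f rest [] (cur.reverse :: acc) := by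
          simp [PySem.Chars.splitOn.go, List.isPrefixOf]
        rw [hgo, ih rest [] (cur.reverse :: acc) (by simpa using Nat.lt_of_succ_lt_succ h)]
        simp only [splitE, List.modifyHead, List.reverse_cons, List.reverse_nil,
          List.nil_append, List.append_assoc, List.cons_append, List.append_cancel_left_eq]
        cases splitE c rest <;> simp
      · have hgo : PySem.Chars.splitOn.go [e] (f + 1) (c :: rest) cur acc
            = PySem.Chars.splitOn.go [e] f rest (c :: cur) acc := by
          simp [PySem.Chars.splitOn.go, List.isPrefixOf, Ne.symm hc]
        rw [hgo, ih rest (c :: cur) acc (by simpa using Nat.lt_of_succ_lt_succ h)]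
        obtain ⟨h0, t0, ht⟩ := List.exists_cons_of_ne_nil (splitE_ne_nil e rest)
        simp [splitE, hc, ht, List.modifyHead]

theorem splitOn_single (e : Char) (s : List Char) :
    PySem.Chars.splitOn s [e] = splitE e s := by
  have h := go_single e (s.length + 1) s [] [] (by omega)
  simpa [PySem.Chars.splitOn, modifyHead_id_eq] using h

theorem splitE_cons_ne (e c : Char) (r : List Char) (hc : c ≠ e) :
    splitE e (c :: r) = (splitE e r).modifyHead (c :: ·) := by
  cases r <;> simp [splitE, hc]

theorem scanE_cons_ne (e c : Char) (r : List Char) (h : c ≠ e) :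
    scanE e (c :: r) = c :: scanE e r := by
  cases r <;> simp [scanE, h]

theorem loopA_single (e : Char) (ks : List Char) :
    ∀ (i : Nat) (out : List Char),
      unescapeKeyLoopA ks [e] i out = out ++ scanE e (ks.drop i) := by
  intro i out
  induction i, out using unescapeKeyLoopA.induct ks [e] with
  | case1 i out h hesc i1 out1 ih =>
    have he : ks[i] = e := by simpa using hesc
    rw [unescapeKeyLoopA, dif_pos h, if_pos hesc, ih]
    have hdrop : ks.drop i = ks[i] :: ks.drop (i + 1) := List.drop_eq_getElem_cons h
    simp only [i1, out1] at *
    by_cases h2 : i + 1 < ks.length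
    · have ho : (if h2 : i + 1 < ks.length then out ++ [ks[i + 1]] else out)
          = out ++ [ks[i + 1]] := dif_pos h2
      have hdrop2 : ks.drop (i + 1) = ks[i + 1] :: ks.drop (i + 2) := List.drop_eq_getElem_cons h2
      rw [ho, hdrop, hdrop2, he]
      simp [scanE]
    · have ho : (if h2 : i + 1 < ks.length then out ++ [ks[i + 1]] else out) = out := dif_neg h2
      have hdrop1 : ks.drop (i + 1) = [] := List.drop_eq_nil_of_le (by omega)
      have hdrop2 : ks.drop (i + 1 + 1) = [] := List.drop_eq_nil_of_le (by omega)
      rw [ho, hdrop, hdrop1, hdrop2, he]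
      simp [scanE]
  | case2 i out h hesc ih =>
    have hne : ks[i] ≠ e := by
      intro hcc; exact hesc (by simp [hcc])
    rw [unescapeKeyLoopA]
    rw [dif_pos h, if_neg hesc, ih, List.drop_eq_getElem_cons h, scanE_cons_ne e _ _ hne]
    simp
  | case3 i out h =>
    have hd : ks.drop i = [] := List.drop_eq_nil_of_le (by omega)
    rw [unescapeKeyLoopA, dif_neg h]
    simp [hd, scanE]

theorem loopA_multi (esc : List Char) (h1 : esc.length ≠ 1) (ks : List Char) :
    ∀ (i : Nat) (out : List Char),
      unescapeKeyLoopA ks esc i out = out ++ ks.drop i := by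
  intro i out
  induction i, out using unescapeKeyLoopA.induct ks esc with
  | case1 i out h hesc i1 out1 ih => exact absurd (congrArg List.length hesc.symm) (by simpa using h1)
  | case2 i out h hesc ih =>
    rw [unescapeKeyLoopA, dif_pos h, if_neg hesc, ih, List.drop_eq_getElem_cons h]
    simp
  | case3 i out h =>
    have hd : ks.drop i = [] := List.drop_eq_nil_of_le (by omega)
    rw [unescapeKeyLoopA, dif_neg h]
    simp [hd]

theorem loopB_glue (esc : List Char) (parts : List (List Char)) :
    ∀ (j : Nat) (out : List (List Char)),
      (unescapeKeyLoopB esc parts parts.length j out).flatten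
        = out.flatten ++ glueT esc (parts.drop j) := by
  intro j out
  induction j, out using unescapeKeyLoopB.induct esc parts parts.length with
  | case1 j out h p hp ih =>
    have hdrop : parts.drop j = parts[j] :: parts.drop (j + 1) := List.drop_eq_getElem_cons h
    have hpj : parts.getD j [] = parts[j] := by simp [List.getD_eq_getElem?_getD, h]
    have hp2 : parts[j] ≠ [] := by rw [← hpj]; exact hp
    rw [unescapeKeyLoopB, if_pos h]
    simp only [hpj]
    simp only [p, hpj] at ih
    rw [if_pos hp2, ih, hdrop, glueT_cons_ne esc _ _ hp2]
    simp
  | case2 j out h p hp h2 ih =>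
    have hdrop : parts.drop j = parts[j] :: parts[j + 1] :: parts.drop (j + 2) := by
      rw [List.drop_eq_getElem_cons h, List.drop_eq_getElem_cons h2]
    have hpj : parts.getD j [] = parts[j] := by simp [List.getD_eq_getElem?_getD, h]
    have hq : parts.getD (j + 1) [] = parts[j + 1] := by
      simp [List.getD_eq_getElem?_getD, h2]
    have hpnil : parts[j] = ([] : List Char) := by
      rw [← hpj]; exact not_not.mp hp
    rw [unescapeKeyLoopB, if_pos h]
    simp only [hpj, hpnil, ne_eq, not_true_eq_false, if_false, if_pos h2]
    rw [ih, hdrop, hq, hpnil, glueT_nil_cons]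
    simp
  | case3 j out h p hp h2 ih =>
    have hlen : parts.length = j + 1 := by omega
    have hpj : parts.getD j [] = parts[j] := by simp [List.getD_eq_getElem?_getD, h]
    have hpnil : parts[j] = ([] : List Char) := by
      rw [← hpj]; exact not_not.mp hp
    have hd1 : parts.drop (j + 1) = [] := List.drop_eq_nil_of_le (by omega)
    have hdrop : parts.drop j = [parts[j]] := by
      rw [List.drop_eq_getElem_cons h, hd1]
    rw [unescapeKeyLoopB, if_pos h]
    simp only [hpj, hpnil, ne_eq, not_true_eq_false, if_false, if_neg h2]
    rw [ih, hdrop, hpnil, hd1, glueT_nil_singleton]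
    simp [glueT]
  | case4 j out h =>
    have hd : parts.drop j = [] := List.drop_eq_nil_of_le (by omega)
    rw [unescapeKeyLoopB, if_neg h]
    simp [hd, glueT]

theorem scan_eq_glue (e : Char) : ∀ s : List Char,
    scanE e s = (splitE e s).headI ++ glueT [e] (splitE e s).tail := by
  intro s
  induction s using scanE.induct e with
  | case1 => simp [splitE, glueT, scanE]
  | case2 => simp [splitE, glueT, scanE]
  | case3 c hc => simp [splitE, glueT, scanE, hc, List.modifyHead]
  | case4 d r ih =>
    obtain ⟨h0, t0, ht⟩ := List.exists_cons_of_ne_nil (splitE_ne_nil e r)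
    rw [ht] at ih
    simp only [List.headI_cons, List.tail_cons] at ih
    have hscan : scanE e (e :: d :: r) = d :: scanE e r := by simp [scanE]
    have hsplit : splitE e (e :: d :: r) = [] :: splitE e (d :: r) := by simp [splitE]
    rw [hscan, hsplit, List.headI_cons, List.tail_cons]
    by_cases hd : d = e
    · subst hd
      have h2 : splitE d (d :: r) = [] :: splitE d r := by simp [splitE]
      rw [h2, ht, glueT_nil_cons, ih]
      simp
    · have h2 : splitE e (d :: r) = (d :: h0) :: t0 := by
        rw [splitE_cons_ne e d r hd, ht]; rfl
      rw [h2, glueT_cons_ne _ _ _ (by simp), ih]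
      simp
  | case5 c d r hc ih =>
    obtain ⟨h0, t0, ht⟩ := List.exists_cons_of_ne_nil (splitE_ne_nil e (d :: r))
    rw [ht] at ih
    simp only [List.headI_cons, List.tail_cons] at ih
    have hsplit : splitE e (c :: d :: r) = (c :: h0) :: t0 := by
      rw [splitE_cons_ne e c (d :: r) hc, ht]; rfl
    rw [scanE_cons_ne e c (d :: r) hc, hsplit, List.headI_cons, List.tail_cons, ih]
    simp

theorem join_nil_eq_flatten (parts : List (List Char)) :
    PySem.Chars.join [] parts = parts.flatten := by
  induction parts with
  | nil => rfl
  | cons p ps ih =>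
    cases ps with
    | nil => simp [PySem.Chars.join, List.intercalate]
    | cons q qs =>
      simp only [PySem.Chars.join, List.intercalate, List.intersperse] at *
      simp_all

-- ===== VERDICT (by name: the statement is the Claim_ definition above) =====
theorem unescape_key_spec : Claim_equal_unescape_key := by
  intro key escape sep _
  unfold Spec_unescape_key unescape_key unescape_key_alt
  have hlen : PySem.Str.len escape = (escape.toList.length : Int) := by
    simp [PySem.Str.len_eq]
  by_cases h1 : escape.toList.length = 1
  · obtain ⟨e, he⟩ : ∃ e, escape.toList = [e] := by
      cases hesc : escape.toList with
      | nil => simp [hesc] at h1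
      | cons a t => cases t with
        | nil => exact ⟨a, rfl⟩
        | cons b t' => simp [hesc] at h1
    rw [if_neg (by simp [h1])]
    rw [he, loopA_single e key.toList 0 [], splitOn_single e key.toList]
    obtain ⟨p0, rest, hsp⟩ := List.exists_cons_of_ne_nil (splitE_ne_nil e key.toList)
    unfold unescapeKeyJoinB
    rw [hsp, join_nil_eq_flatten]
    rw [loopB_glue [e] (p0 :: rest) 1 [(p0 :: rest).getD 0 []]]
    simp only [List.drop_zero, List.nil_append]
    rw [scan_eq_glue e key.toList, hsp]
    simp
  · rw [if_pos (show PySem.Str.len escape ≠ 1 by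
      rw [hlen]; intro hc; exact h1 (by exact_mod_cast hc))]
    rw [loopA_multi escape.toList h1 key.toList 0 []]
    simp [String.ofList_toList]
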